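-- pv_equiv track=rewrite | github.com/coingraham/adventofcode | 2020/day6.py | collect_groups_everyone
-- ===== SOURCE A (Python) =====
-- def collect_groups_everyone(groups):
--     declarations = []
--     temp_declarations = [0, set([])]
--     for group in groups:
--         if group == '':
--             declarations.append(temp_declarations[1])
--             temp_declarations = [0, set([])]
--         else:
--             if temp_declarations[0]:
--                 individual = set([])
--                 for question in list(group):
--                     individual.add(question)
--                 temp_declarations[1] = temp_declarations[1].intersection(individual)
--                 individual.clear()
--             else:
--                 for question in list(group):
--                     temp_declarations[1].add(question)
--                     temp_declarations[0] += 1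
--
--     # We do one final append in case the last line isn't ''
--     declarations.append(temp_declarations[1])
--     return declarations
-- ===== SOURCE B (Python) =====
-- def collect_groups_everyone(groups):
--     # Pass 1: split into segments of consecutive non-blank lines ('' starts a new segment).
--     segments = [[]]
--     for g in groups:
--         if g == '':
--             segments.append([])
--         else:
--             segments[-1].append(g)
--     # Pass 2: each segment's answer is the intersection of its lines' character sets.
--     out = []
--     for seg in segments:
--         if not seg:
--             out.append(set())
--         else:
--             acc = set(seg[0])
--             for line in seg[1:]:
--                 acc = acc.intersection(set(line))
--             out.append(acc)
--     return out
-- ===== Notes on version B (the rewrite author's own statement) =====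
-- stated objective: simpler
-- what changed: Replaces A's single-pass state machine carrying a character counter and a mutable running set with a two-pass decomposition: first split the lines into blank-separated segments, then map each segment to the intersection of its lines' character sets (empty set for empty segments).
import Mathlib
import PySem

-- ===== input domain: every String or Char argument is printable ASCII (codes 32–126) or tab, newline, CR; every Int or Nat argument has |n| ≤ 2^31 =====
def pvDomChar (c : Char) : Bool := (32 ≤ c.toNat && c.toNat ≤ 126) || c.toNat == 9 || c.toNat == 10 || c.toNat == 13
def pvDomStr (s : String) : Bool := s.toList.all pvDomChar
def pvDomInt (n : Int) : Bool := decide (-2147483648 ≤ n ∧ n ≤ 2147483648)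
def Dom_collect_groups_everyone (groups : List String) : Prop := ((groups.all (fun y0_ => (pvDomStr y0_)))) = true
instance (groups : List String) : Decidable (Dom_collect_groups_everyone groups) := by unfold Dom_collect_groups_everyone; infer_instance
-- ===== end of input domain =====

-- B replaces A's streaming counter-plus-set state machine by a two-pass decomposition
-- (split into segments, then map each segment to the intersection of its lines' char sets);
-- objective: simpler. Equivalence is about the RETURN value (neither mutates its argument).

-- ===== PORT A =====
-- one step of A's loop over groups; state = (declarations, temp_declarations[0], temp_declarations[1])
def aStep (st : List (List String) × Int × List String) (group : String) :
    List (List String) × Int × List String :=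
  if group = "" then
    (st.1 ++ [st.2.2], 0, PySem.Set.empty)
  else
    if st.2.1 ≠ 0 then
      -- individual = set of group's characters, built by the inner add-loop
      let individual := group.toList.foldl (fun t c => PySem.Set.add t (toString c)) PySem.Set.empty
      (st.1, st.2.1, PySem.Set.inter st.2.2 individual)
    else
      -- for question in list(group): temp[1].add(question); temp[0] += 1
      let r := group.toList.foldl
        (fun (p : List String × Int) c => (PySem.Set.add p.1 (toString c), p.2 + 1))
        (st.2.2, st.2.1)
      (st.1, r.2, r.1)

def collect_groups_everyone (groups : List String) : List (List String) :=
  let st := groups.foldl aStep ([], 0, PySem.Set.empty)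
  st.1 ++ [st.2.2]

-- ===== PORT B =====
-- pass 1: segments of consecutive non-blank lines; state = (finished segments, current segment)
def bSplitStep (acc : List (List String) × List String) (g : String) :
    List (List String) × List String :=
  if g = "" then (acc.1 ++ [acc.2], []) else (acc.1, acc.2 ++ [g])

-- pass 2: a segment's answer set
def segAnswer (seg : List String) : List String :=
  match seg with
  | [] => PySem.Set.empty
  | l :: rest =>
    rest.foldl
      (fun acc line => PySem.Set.inter acc (PySem.Set.ofList (line.toList.map toString)))
      (PySem.Set.ofList (l.toList.map toString))

def collect_groups_everyone_alt (groups : List String) : List (List String) :=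
  let p := groups.foldl bSplitStep ([], [])
  (p.1 ++ [p.2]).map segAnswer

-- ===== PRECONDITION & SPEC =====
def Spec_collect_groups_everyone (groups : List String) (out : List (List String)) : Prop := out = collect_groups_everyone_alt groups
instance (groups : List String) (out : List (List String)) : Decidable (Spec_collect_groups_everyone groups out) := by unfold Spec_collect_groups_everyone; infer_instance

-- ===== CLAIM (what is proved, stated in full; the proofs are below) =====
def Claim_equal_collect_groups_everyone : Prop := ∀ (groups : List String), Dom_collect_groups_everyone groups → Spec_collect_groups_everyone groups (collect_groups_everyone groups)

-- ===== LEMMAS AND PROOFS =====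

-- A's inner fill loop, with the counter projected out
lemma fill_loop_eq (l : List Char) (s : List String) (c : Int) :
    l.foldl (fun (p : List String × Int) ch => (PySem.Set.add p.1 (toString ch), p.2 + 1)) (s, c)
      = (l.foldl (fun t ch => PySem.Set.add t (toString ch)) s, c + l.length) := by
  induction l generalizing s c with
  | nil => simp
  | cons ch t ih => simp [ih]; omega

lemma ofList_map_eq_fold (l : List Char) :
    PySem.Set.ofList (l.map toString)
      = l.foldl (fun t ch => PySem.Set.add t (toString ch)) PySem.Set.empty := by
  rw [PySem.Set.ofList_eq_foldl, List.foldl_map]; rfl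

lemma segAnswer_append (cur : List String) (g : String) (h : cur ≠ []) :
    segAnswer (cur ++ [g])
      = PySem.Set.inter (segAnswer cur) (PySem.Set.ofList (g.toList.map toString)) := by
  cases cur with
  | nil => exact absurd rfl h
  | cons l rest => simp [segAnswer, List.foldl_append]

-- the loop invariant: A's state (decls, cnt, s) corresponds to B's (segs, cur)
lemma loop_eq (groups : List String) (decls segs : List (List String))
    (cnt : Int) (s cur : List String)
    (hd : decls = segs.map segAnswer)
    (hc : cnt = 0 ↔ cur = [])
    (hs : s = segAnswer cur) :
    (fun st : List (List String) × Int × List String => st.1 ++ [st.2.2])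
        (groups.foldl aStep (decls, cnt, s))
      = (fun p : List (List String) × List String => (p.1 ++ [p.2]).map segAnswer)
        (groups.foldl bSplitStep (segs, cur)) := by
  induction groups generalizing decls segs cnt s cur with
  | nil => simp [hd, hs]
  | cons g gs ih =>
    by_cases hg : g = ""
    · simp only [List.foldl_cons, aStep, bSplitStep, hg]
      exact ih _ _ _ _ _ (by simp [hd, hs]) (by simp) (by simp [segAnswer, PySem.Set.empty])
    · by_cases hcz : cnt = 0
      · have hcur : cur = [] := hc.mp hcz
        have hlen : g.toList ≠ [] := fun he => hg (String.toList_eq_nil_iff.mp he)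
        simp only [List.foldl_cons, aStep, bSplitStep, if_neg hg, hcz, ne_eq,
          not_true_eq_false, ite_false]
        rw [fill_loop_eq]
        refine ih _ _ _ _ _ hd ?_ ?_
        · have hpos : 0 < g.toList.length := List.length_pos_iff.mpr hlen
          constructor
          · intro h; omega
          · intro h; simp [hcur] at h
        · rw [hcur]
          simp [segAnswer, ofList_map_eq_fold, hs, hcur, PySem.Set.empty]
      · have hcur : cur ≠ [] := fun h => hcz (hc.mpr h)
        simp only [List.foldl_cons, aStep, bSplitStep, if_neg hg, ne_eq, hcz,
          not_false_eq_true, if_pos]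
        refine ih _ _ _ _ _ hd ?_ ?_
        · constructor
          · intro h; exact absurd h hcz
          · intro h; simp at h
        · rw [segAnswer_append cur g hcur, hs, ofList_map_eq_fold]

-- ===== VERDICT (by name: the statement is the Claim_ definition above) =====
theorem collect_groups_everyone_spec : Claim_equal_collect_groups_everyone := by
  intro groups _
  show _ = _
  exact loop_eq groups [] [] 0 PySem.Set.empty [] rfl (by simp) rfl
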